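-- pv_equiv track=rewrite | github.com/bmparent/eidos | eidos/tools/domain_tuner.py | _burst_max
-- ===== SOURCE A (Python) =====
-- from typing import Any, Dict, List, Optional, Tuple
--
-- def _burst_max(statuses: List[str], prefix: str) -> int:
--     best = 0
--     current = 0
--     for status in statuses:
--         if status.startswith(prefix):
--             current += 1
--             best = max(best, current)
--         else:
--             current = 0
--     return best
-- ===== SOURCE B (Python) =====
-- def _burst_max(statuses, prefix):
--     fails = [i for i, s in enumerate(statuses) if not s.startswith(prefix)]
--     bounds = [-1] + fails + [len(statuses)]
--     return max((b - a - 1 for a, b in zip(bounds, bounds[1:])), default=0)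
-- ===== Notes on version B (the rewrite author's own statement) =====
-- stated objective: alternative
-- what changed: B computes the indices of non-matching statuses once, brackets them with -1 and len(statuses), and returns the maximum gap between consecutive boundaries, instead of maintaining running current/best counters over the list.
import Mathlib
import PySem

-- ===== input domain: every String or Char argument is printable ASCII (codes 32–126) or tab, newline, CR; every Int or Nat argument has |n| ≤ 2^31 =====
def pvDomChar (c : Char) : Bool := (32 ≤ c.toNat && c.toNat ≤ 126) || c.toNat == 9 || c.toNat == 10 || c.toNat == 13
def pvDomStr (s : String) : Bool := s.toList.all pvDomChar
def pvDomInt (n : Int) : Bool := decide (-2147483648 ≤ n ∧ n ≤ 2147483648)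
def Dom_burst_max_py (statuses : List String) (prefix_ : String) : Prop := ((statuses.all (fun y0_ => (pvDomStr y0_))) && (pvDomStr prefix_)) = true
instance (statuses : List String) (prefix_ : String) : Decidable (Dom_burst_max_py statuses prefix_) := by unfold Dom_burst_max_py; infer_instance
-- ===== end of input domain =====

-- B replaces A's running best/current counters by computing the non-matching
-- positions once and taking the maximum gap between consecutive failure
-- boundaries ("alternative": same O(n) cost, a different decomposition).

-- ===== PORT A =====
-- literal port of A: fold over statuses with state (best, current)
def burst_max_py (statuses : List String) (prefix_ : String) : Int :=
  (statuses.foldl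
    (fun (st : Int × Int) status =>
      if PySem.Str.startswith status prefix_ then
        (max st.1 (st.2 + 1), st.2 + 1)
      else
        (st.1, 0))
    ((0 : Int), (0 : Int))).1

-- ===== PORT B =====
-- literal port of Source B: failure indices, boundary list, max gap (default 0)
def burst_max_py_alt (statuses : List String) (prefix_ : String) : Int :=
  let fails : List Int :=
    ((PySem.List.enumerate statuses).filter
      (fun p => !(PySem.Str.startswith p.2 prefix_))).map (fun p => p.1)
  let bounds : List Int := (-1) :: (fails ++ [(statuses.length : Int)])
  PySem.List.maxD
    ((bounds.zip (PySem.List.slice bounds (some 1))).map (fun p => p.2 - p.1 - 1))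
    (fun x => x) 0

-- ===== PRECONDITION & SPEC =====
def Spec_burst_max_py (statuses : List String) (prefix_ : String) (out : Int) : Prop := out = burst_max_py_alt statuses prefix_
instance (statuses : List String) (prefix_ : String) (out : Int) : Decidable (Spec_burst_max_py statuses prefix_ out) := by unfold Spec_burst_max_py; infer_instance

-- ===== CLAIM (what is proved, stated in full; the proofs are below) =====
def Claim_equal_burst_max_py : Prop := ∀ (statuses : List String) (prefix_ : String), Dom_burst_max_py statuses prefix_ → Spec_burst_max_py statuses prefix_ (burst_max_py statuses prefix_)

-- ===== LEMMAS AND PROOFS =====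

-- length of the maximal matching prefix of the list
def pvLead (p : String) : List String → Int
  | [] => 0
  | s :: t => if PySem.Str.startswith s p then pvLead p t + 1 else 0

-- length of the longest matching run anywhere in the list
def pvInner (p : String) : List String → Int
  | [] => 0
  | s :: t => if PySem.Str.startswith s p then max (pvLead p t + 1) (pvInner p t) else pvInner p t

-- longest matching run strictly after the first failure
def pvTail (p : String) : List String → Int
  | [] => 0
  | s :: t => if PySem.Str.startswith s p then pvTail p t else pvInner p t

-- the failure indices of xs, counting from i
def pvFails (p : String) (i : Int) : List String → List Int
  | [] => []
  | s :: t => if PySem.Str.startswith s p then pvFails p (i+1) t else i :: pvFails p (i+1) t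

def pvGaps (l : List Int) : List Int := (l.zip l.tail).map (fun p => p.2 - p.1 - 1)

theorem pvLead_nonneg (p : String) (xs : List String) : 0 ≤ pvLead p xs := by
  induction xs with
  | nil => simp [pvLead]
  | cons s t ih => simp only [pvLead]; split <;> omega

theorem pvInner_nonneg (p : String) (xs : List String) : 0 ≤ pvInner p xs := by
  induction xs with
  | nil => simp [pvInner]
  | cons s t ih => simp only [pvInner]; split <;> omega

theorem pvLead_le_pvInner (p : String) (xs : List String) : pvLead p xs ≤ pvInner p xs := by
  induction xs with
  | nil => simp [pvLead, pvInner]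
  | cons s t ih =>
    simp only [pvLead, pvInner]
    split
    · omega
    · exact pvInner_nonneg p t

theorem pvInner_eq_max (p : String) (xs : List String) :
    pvInner p xs = max (pvLead p xs) (pvTail p xs) := by
  induction xs with
  | nil => simp [pvInner, pvLead, pvTail]
  | cons s t ih =>
    simp only [pvInner, pvLead, pvTail]
    split
    · have h1 := pvLead_le_pvInner p t
      have h2 := pvLead_nonneg p t
      omega
    · have := pvInner_nonneg p t
      omega

-- A's fold, characterised for any incoming state (best, current) with 0 ≤ current ≤ best
theorem pvFoldA (p : String) (xs : List String) :
    ∀ b c : Int, 0 ≤ c → c ≤ b →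
    (xs.foldl
      (fun (st : Int × Int) status =>
        if PySem.Str.startswith status p then
          (max st.1 (st.2 + 1), st.2 + 1)
        else
          (st.1, 0)) (b, c)).1
    = max b (max (pvInner p xs) (c + pvLead p xs)) := by
  induction xs with
  | nil =>
    intro b c h0 hcb
    simp only [List.foldl_nil, pvInner, pvLead]
    omega
  | cons s t ih =>
    intro b c h0 hcb
    simp only [List.foldl_cons, pvInner, pvLead]
    by_cases hm : PySem.Str.startswith s p = true
    · simp only [hm, if_true]
      rw [ih (max b (c + 1)) (c + 1) (by omega) (by omega)]
      have h1 := pvLead_nonneg p t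
      have h2 := pvInner_nonneg p t
      omega
    · rw [Bool.not_eq_true] at hm
      simp only [hm, Bool.false_eq_true, if_false]
      rw [ih b 0 le_rfl (by omega)]
      have h1 := pvLead_le_pvInner p t
      have h2 := pvInner_nonneg p t
      omega

theorem pvA_eq_inner (p : String) (xs : List String) :
    burst_max_py xs p = pvInner p xs := by
  unfold burst_max_py
  rw [pvFoldA p xs 0 0 le_rfl le_rfl]
  have h1 := pvLead_le_pvInner p xs
  have h2 := pvInner_nonneg p xs
  omega

-- the filtered enumeration of B is pvFails
theorem pvEnum_fails (p : String) (xs : List String) :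
    ∀ i : Int,
    ((PySem.List.enumerate xs i).filter
      (fun q => !(PySem.Str.startswith q.2 p))).map (fun q => q.1) = pvFails p i xs := by
  induction xs with
  | nil => intro i; simp [PySem.List.enumerate_nil, pvFails]
  | cons s t ih =>
    intro i
    have ih' := ih (i + 1)
    simp only [PySem.Str.startswith_eq] at ih'
    rw [PySem.List.enumerate_cons]
    simp only [List.filter_cons, pvFails, PySem.Str.startswith_eq]
    by_cases hm : PySem.Chars.startswith s.toList p.toList = true
    · simp [hm, ih']
    · simp [hm, ih']

theorem pvGaps_cons (a b : Int) (l : List Int) :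
    pvGaps (a :: b :: l) = (b - a - 1) :: pvGaps (b :: l) := rfl

theorem pvFoldl_max_cons (x h : Int) (t : List Int) :
    List.foldl max (max x h) t = max x (List.foldl max h t) := by
  induction t generalizing h with
  | nil => simp
  | cons a t ih =>
    simp only [List.foldl_cons]
    rw [max_assoc, ih]

theorem pvMaxD_cons (x : Int) (l : List Int) (hl : l ≠ []) :
    PySem.List.maxD (x :: l) (fun y => y) 0 = max x (PySem.List.maxD l (fun y => y) 0) := by
  obtain ⟨h, t, rfl⟩ := List.exists_cons_of_ne_nil hl
  simp only [PySem.List.maxD, PySem.List.max?_id_cons, Option.getD_some, List.foldl_cons]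
  exact pvFoldl_max_cons x h t

-- the maximal gap between consecutive boundaries q :: fails ++ [i + |xs|]
theorem pvGapMax (p : String) (xs : List String) :
    ∀ q i : Int, q < i →
    PySem.List.maxD (pvGaps (q :: (pvFails p i xs ++ [i + (xs.length : Int)])))
      (fun y => y) 0
    = max (i + pvLead p xs - q - 1) (pvTail p xs) := by
  induction xs with
  | nil =>
    intro q i hqi
    simp only [pvFails, List.nil_append, List.length_nil, Int.natCast_zero, add_zero,
      pvLead, pvTail]
    simp only [pvGaps, List.tail_cons, List.zip_cons_cons, List.zip_nil_right, List.map]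
    simp only [PySem.List.maxD, PySem.List.max?_id_cons, List.foldl_nil, Option.getD_some]
    omega
  | cons s t ih =>
    intro q i hqi
    by_cases hm : PySem.Str.startswith s p = true
    · simp only [pvFails, hm, if_true, pvLead, pvTail, List.length_cons]
      have hcast : i + ((t.length + 1 : Nat) : Int) = (i + 1) + (t.length : Int) := by
        push_cast; ring
      rw [hcast, ih q (i + 1) (by omega)]
      omega
    · rw [Bool.not_eq_true] at hm
      simp only [pvFails, hm, Bool.false_eq_true, if_false, pvLead, pvTail, List.length_cons]
      have hcast : i + ((t.length + 1 : Nat) : Int) = (i + 1) + (t.length : Int) := by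
        push_cast; ring
      rw [hcast, List.cons_append, pvGaps_cons]
      rw [pvMaxD_cons _ _ (by simp [pvGaps])]
      rw [ih i (i + 1) (by omega)]
      rw [pvInner_eq_max]
      omega

theorem pvB_eq_inner (p : String) (xs : List String) :
    burst_max_py_alt xs p = pvInner p xs := by
  unfold burst_max_py_alt
  simp only [PySem.List.slice_from_one, List.tail_cons]
  rw [pvEnum_fails p xs 0]
  have h := pvGapMax p xs (-1) 0 (by omega)
  simp only [zero_add] at h
  rw [show (List.zip ((-1) :: (pvFails p 0 xs ++ [(xs.length : Int)]))
        (pvFails p 0 xs ++ [(xs.length : Int)])).map (fun p => p.2 - p.1 - 1)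
      = pvGaps ((-1) :: (pvFails p 0 xs ++ [(xs.length : Int)])) from rfl]
  rw [h, pvInner_eq_max]
  have := pvLead_nonneg p xs
  omega

-- ===== VERDICT (by name: the statement is the Claim_ definition above) =====
theorem burst_max_py_spec : Claim_equal_burst_max_py := by
  intro statuses prefix_ _
  unfold Spec_burst_max_py
  rw [pvA_eq_inner, pvB_eq_inner]
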